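-- pv_equiv track=rewrite | github.com/AllenPeng0209/Wondera | services/backend/seed/extract_mobile_roles.py | find_single_quoted_end
-- ===== SOURCE A (Python) =====
-- def find_single_quoted_end(text: str, start: int) -> int:
--     """從 start 開始（在開頭 ' 之後），找到結束的單引號（未轉義）。"""
--     i = start
--     while i < len(text):
--         if text[i] == "\\":
--             i += 2
--             continue
--         if text[i] == "'":
--             return i
--         i += 1
--     return -1
-- ===== SOURCE B (Python) =====
-- import re
--
-- # One regex does the scan: each escaped pair "\\." or ordinary char "[^'\\]" is
-- # consumed; the match stops at the first unescaped quote (or a trailing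
-- # backslash / end of string).  re.DOTALL lets "\\." consume escaped newlines.
-- _QUOTED_CHUNK = re.compile(r"(?:\\.|[^'\\])*", re.DOTALL)
--
--
-- def find_single_quoted_end(text: str, start: int) -> int:
--     """從 start 開始（在開頭 ' 之後），找到結束的單引號（未轉義）。"""
--     end = _QUOTED_CHUNK.match(text, start).end()
--     return end if end < len(text) and text[end] == "'" else -1
-- ===== Notes on version B (the rewrite author's own statement) =====
-- stated objective: idiomatic
-- what changed: A's manual index-stepping while-loop (i += 2 over escapes) is replaced by one precompiled regex (?:\\.|[^'\\])* matched at start with re.DOTALL; the answer is read off m.end() with a single quote check.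
-- outside the precondition, e.g. on find_single_quoted_end("'", -1): A returns -1, B returns 0; on find_single_quoted_end("ab'", -1): A returns -1, B returns 2; on find_single_quoted_end("a'", -3): A raises IndexError, B returns 1
import Mathlib
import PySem

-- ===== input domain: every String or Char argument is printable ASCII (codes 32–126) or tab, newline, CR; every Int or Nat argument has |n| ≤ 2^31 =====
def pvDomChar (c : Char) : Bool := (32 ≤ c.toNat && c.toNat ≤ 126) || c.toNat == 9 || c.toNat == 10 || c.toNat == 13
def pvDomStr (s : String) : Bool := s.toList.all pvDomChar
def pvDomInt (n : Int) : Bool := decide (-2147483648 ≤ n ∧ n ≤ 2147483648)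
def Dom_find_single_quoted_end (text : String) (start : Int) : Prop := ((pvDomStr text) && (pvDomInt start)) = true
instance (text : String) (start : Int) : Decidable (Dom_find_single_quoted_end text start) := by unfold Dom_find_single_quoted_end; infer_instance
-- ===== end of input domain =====

-- B replaces A's manual index-stepping loop by a single precompiled regex
-- (?:\\.|[^'\\])* matched at `start` (objective: idiomatic); return value only.

-- ===== PORT A =====
-- A's while-loop: i steps by 2 over a backslash, by 1 otherwise
def pvScanA (cs : List Char) (i : Int) : Int :=
  if _h : i < (cs.length : Int) then
    match PySem.List.pyGet? cs i with
    | none => -1      -- text[i]: IndexError in Python (start < -len); excluded by Pre_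
    | some c =>
      if c = '\\' then pvScanA cs (i + 2)
      else if c = '\'' then i
      else pvScanA cs (i + 1)
  else -1
termination_by ((cs.length : Int) - i).toNat
decreasing_by all_goals (simp at *; omega)

def find_single_quoted_end (text : String) (start : Int) : Int :=
  pvScanA text.toList start

-- ===== PORT B =====
-- m.end() of the greedy match of (?:\\.|[^'\\])* at position e: "\\." consumes
-- an escaped pair (needs a char after the backslash; DOTALL), "[^'\\]" one
-- ordinary char; the match stops at the first unescaped quote, a trailing
-- backslash, or the end of the string.
def pvChunkEnd (cs : List Char) (e : Nat) : Nat :=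
  if _h : e + 1 < cs.length ∧ cs.getD e ' ' = '\\' then pvChunkEnd cs (e + 2)
  else if _h2 : e < cs.length ∧ cs.getD e ' ' ≠ '\'' ∧ cs.getD e ' ' ≠ '\\' then pvChunkEnd cs (e + 1)
  else e
termination_by cs.length - e
decreasing_by all_goals omega

def find_single_quoted_end_alt (text : String) (start : Int) : Int :=
  let cs := text.toList
  -- Pattern.match clamps a negative pos to 0: exactly Int.toNat
  let e := pvChunkEnd cs start.toNat
  if e < cs.length ∧ cs.getD e ' ' = '\'' then (e : Int) else -1

-- ===== PRECONDITION & SPEC =====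
-- Pre_ restricts to the function's natural domain, start ≥ 0 (every caller passes a
-- position just after an opening quote).  For start < -len(text) A raises IndexError;
-- for -len(text) ≤ start < 0 A scans through Python's accidental negative-index
-- wraparound and reports positions as negative indices (even -1, colliding with the
-- not-found sentinel), values B's regex (which clamps pos to 0) cannot meaningfully match.
def Pre_find_single_quoted_end (text : String) (start : Int) : Prop :=
  0 ≤ start
instance (text : String) (start : Int) : Decidable (Pre_find_single_quoted_end text start) := by unfold Pre_find_single_quoted_end; infer_instance

def pvWitness_find_single_quoted_end : String × Int := ("ab\\''", 0)

def Spec_find_single_quoted_end (text : String) (start : Int) (out : Int) : Prop := out = find_single_quoted_end_alt text start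
instance (text : String) (start : Int) (out : Int) : Decidable (Spec_find_single_quoted_end text start out) := by unfold Spec_find_single_quoted_end; infer_instance

-- ===== CLAIM (what is proved, stated in full; the proofs are below) =====
def Claim_equal_find_single_quoted_end : Prop := ∀ (text : String) (start : Int), Dom_find_single_quoted_end text start → Pre_find_single_quoted_end text start → Spec_find_single_quoted_end text start (find_single_quoted_end text start)

-- ===== LEMMAS AND PROOFS =====

-- correspondence of the two scans at nonnegative positions
lemma pvMain (cs : List Char) : ∀ (k j : Nat), cs.length ≤ j + k →
    pvScanA cs (j : Int) =
      (if pvChunkEnd cs j < cs.length ∧ cs.getD (pvChunkEnd cs j) ' ' = '\'' then ((pvChunkEnd cs j : Nat) : Int) else -1) := by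
  intro k
  induction k with
  | zero =>
    intro j hj
    rw [pvScanA, pvChunkEnd]
    have h1 : ¬ ((j : Int) < (cs.length : Int)) := by omega
    have h2 : ¬ (j + 1 < cs.length ∧ cs.getD j ' ' = '\\') := by omega
    have h3 : ¬ (j < cs.length ∧ cs.getD j ' ' ≠ '\'' ∧ cs.getD j ' ' ≠ '\\') := by omega
    rw [dif_neg h1, dif_neg h2, dif_neg h3, if_neg (by omega)]
  | succ k ih =>
    intro j hj
    by_cases hlt : j < cs.length
    · have hget : PySem.List.pyGet? cs (j : Int) = some cs[j] :=
        PySem.List.pyGet?_ofNat cs j hlt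
      have hgetD : cs.getD j ' ' = cs[j] := List.getD_eq_getElem cs ' ' hlt
      rw [pvScanA, dif_pos (by omega), hget]
      show (if cs[j] = '\\' then pvScanA cs ((j : Int) + 2)
            else if cs[j] = '\'' then (j : Int) else pvScanA cs ((j : Int) + 1)) = _
      by_cases hbs : cs[j] = '\\'
      · by_cases hnext : j + 1 < cs.length
        · rw [if_pos hbs]
          rw [pvChunkEnd, dif_pos ⟨hnext, by rw [hgetD]; exact hbs⟩]
          have : (j : Int) + 2 = ((j + 2 : Nat) : Int) := by omega
          rw [this]
          exact ih (j + 2) (by omega)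
        · rw [if_pos hbs]
          rw [pvChunkEnd, dif_neg (by omega), dif_neg (by rw [hgetD]; tauto)]
          rw [pvScanA, dif_neg (by omega), if_neg (by rw [hgetD]; simp [hbs])]
      · by_cases hq : cs[j] = '\''
        · rw [if_neg hbs, if_pos hq]
          rw [pvChunkEnd, dif_neg (by rw [hgetD]; tauto), dif_neg (by rw [hgetD]; tauto)]
          rw [if_pos ⟨hlt, by rw [hgetD]; exact hq⟩]
        · rw [if_neg hbs, if_neg hq]
          rw [pvChunkEnd, dif_neg (by rw [hgetD]; tauto), dif_pos ⟨hlt, by rw [hgetD]; tauto⟩]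
          have : (j : Int) + 1 = ((j + 1 : Nat) : Int) := by omega
          rw [this]
          exact ih (j + 1) (by omega)
    · rw [pvScanA, pvChunkEnd]
      rw [dif_neg (by omega), dif_neg (by omega), dif_neg (by omega), if_neg (by omega)]

-- ===== VERDICT (by name: the statement is the Claim_ definition above) =====
theorem find_single_quoted_end_spec : Claim_equal_find_single_quoted_end := by
  intro text start _ hPre
  unfold Pre_find_single_quoted_end at hPre
  unfold Spec_find_single_quoted_end find_single_quoted_end find_single_quoted_end_alt
  have h1 : ((start.toNat : Nat) : Int) = start := Int.toNat_of_nonneg hPre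
  rw [← h1]
  exact pvMain text.toList text.toList.length start.toNat (by omega)
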